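-- pv_equiv track=rewrite | github.com/Rohitrky2021/JavaSourceCode | =EXAMTIME/1_TradeDesk/Sell Stocks/c.py | calc
-- ===== SOURCE A (Python) =====
-- def calc(r, s):
--     bp = 0
--     tp = 0
--
--     for i in range(len(s)):
--         if s[i] == -1:
--             bp += r[i]
--         elif s[i] == 1:
--             tp += r[i] - bp
--             bp = 0
--
--     return tp
-- ===== SOURCE B (Python) =====
-- def calc(r, s):
--     # Each sell contributes +r[i]; a buy is charged exactly once, at the next
--     # sell, so a buy counts iff it lies before the LAST sell.  Two staged
--     # passes: collect the sell indices, then a closed-form difference of sums.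
--     sells = [i for i in range(len(s)) if s[i] == 1]
--     if not sells:
--         return 0
--     return sum(r[i] for i in sells) - sum(r[i] for i in range(sells[-1]) if s[i] == -1)
-- ===== Notes on version B (the rewrite author's own statement) =====
-- stated objective: alternative
-- what changed: Replaces A's forward state machine (pending buy-price accumulator bp reset at each sell) with a staged closed form: collect the sell indices once, then return (sum of r at sells) minus (sum of r at buys before the last sell).
import Mathlib
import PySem

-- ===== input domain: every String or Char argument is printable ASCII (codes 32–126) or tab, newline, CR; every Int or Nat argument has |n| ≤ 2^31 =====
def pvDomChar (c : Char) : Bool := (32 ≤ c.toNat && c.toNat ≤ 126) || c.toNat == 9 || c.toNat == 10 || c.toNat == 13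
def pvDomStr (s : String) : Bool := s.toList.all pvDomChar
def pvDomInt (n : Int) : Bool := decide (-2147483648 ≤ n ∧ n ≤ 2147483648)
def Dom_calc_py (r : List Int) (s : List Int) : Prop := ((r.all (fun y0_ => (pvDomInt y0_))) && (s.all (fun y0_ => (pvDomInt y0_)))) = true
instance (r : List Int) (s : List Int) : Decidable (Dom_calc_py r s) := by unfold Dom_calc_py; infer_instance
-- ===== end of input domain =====

-- B replaces A's forward bp/tp state machine with staged passes and a closed form:
-- sum of r at the sell indices minus sum of r at buys before the last sell (alternative, same cost).

-- ===== PORT A =====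
-- loop body of A: state (bp, tp)
def calcStepA (r : List Int) (s : List Int) (bt : Int × Int) (i : Nat) : Int × Int :=
  if s.getD i 0 = -1 then (bt.1 + r.getD i 0, bt.2)
  else if s.getD i 0 = 1 then (0, bt.2 + (r.getD i 0 - bt.1))
  else bt

def calc_py (r : List Int) (s : List Int) : Int :=
  ((List.range s.length).foldl (calcStepA r s) (0, 0)).2

-- ===== PORT B =====
def calc_py_alt (r : List Int) (s : List Int) : Int :=
  let sells := (List.range s.length).filter (fun i => s.getD i 0 = 1)
  match sells.getLast? with
  | none => 0
  | some last =>
      (sells.map (fun i => r.getD i 0)).sum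
        - (((List.range last).filter (fun i => s.getD i 0 = -1)).map (fun i => r.getD i 0)).sum

-- ===== PRECONDITION & SPEC =====
-- Pre_ excludes exactly the inputs on which Python A raises IndexError:
-- a buy or sell signal (±1) at a position with no corresponding price in r.
def Pre_calc_py (r : List Int) (s : List Int) : Prop :=
  ∀ i : Nat, i < s.length → (s.getD i 0 = -1 ∨ s.getD i 0 = 1) → i < r.length
instance (r : List Int) (s : List Int) : Decidable (Pre_calc_py r s) := by unfold Pre_calc_py; infer_instance

def pvWitness_calc_py : List Int × List Int := ([3, 5, 2], [-1, 1, -1])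

def Spec_calc_py (r : List Int) (s : List Int) (out : Int) : Prop := out = calc_py_alt r s
instance (r : List Int) (s : List Int) (out : Int) : Decidable (Spec_calc_py r s out) := by unfold Spec_calc_py; infer_instance

-- ===== CLAIM (what is proved, stated in full; the proofs are below) =====
def Claim_equal_calc_py : Prop := ∀ (r : List Int) (s : List Int), Dom_calc_py r s → Pre_calc_py r s → Spec_calc_py r s (calc_py r s)

-- ===== LEMMAS AND PROOFS =====

-- sum of r over the buy indices in [a, a+n)
def bsum (r s : List Int) (a n : Nat) : Int :=
  (((List.range' a n).filter (fun i => s.getD i 0 = -1)).map (fun i => r.getD i 0)).sum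

-- sum of r over the sell indices in [0, n)
def ssum (r s : List Int) (n : Nat) : Int :=
  (((List.range n).filter (fun i => s.getD i 0 = 1)).map (fun i => r.getD i 0)).sum

theorem bsum_append (r s : List Int) (a m n : Nat) :
    bsum r s a (m + n) = bsum r s a m + bsum r s (a + m) n := by
  unfold bsum
  rw [← List.range'_append, List.filter_append, List.map_append, List.sum_append, Nat.one_mul]

theorem bsum_one (r s : List Int) (a : Nat) :
    bsum r s a 1 = if s.getD a 0 = -1 then r.getD a 0 else 0 := by
  unfold bsum
  simp only [List.range'_one, List.filter_cons, List.filter_nil, decide_eq_true_eq]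
  split_ifs <;> simp

theorem ssum_succ (r s : List Int) (n : Nat) :
    ssum r s (n + 1) = ssum r s n + (if s.getD n 0 = 1 then r.getD n 0 else 0) := by
  unfold ssum
  rw [List.range_succ, List.filter_append]
  simp only [List.filter_cons, List.filter_nil, decide_eq_true_eq, List.map_append, List.sum_append]
  split_ifs <;> simp

-- The invariant of A's loop, phrased against B's staged sums: after the first n
-- indices, tp is the closed form keyed on the last sell so far, and bp is the
-- buy-sum since that sell.
theorem calc_inv (r s : List Int) (n : Nat) :
    (List.range n).foldl (calcStepA r s) (0, 0)
      = match ((List.range n).filter (fun i => s.getD i 0 = 1)).getLast? with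
        | none => (bsum r s 0 n, 0)
        | some k => (bsum r s (k + 1) (n - (k + 1)), ssum r s n - bsum r s 0 k) := by
  induction n with
  | zero => simp [bsum]
  | succ n ih =>
    have hstep : (List.range (n + 1)).foldl (calcStepA r s) (0, 0)
        = calcStepA r s ((List.range n).foldl (calcStepA r s) (0, 0)) n := by
      rw [List.range_succ, List.foldl_append]; rfl
    have hfil : (List.range (n + 1)).filter (fun i => s.getD i 0 = 1)
        = ((List.range n).filter (fun i => s.getD i 0 = 1))
            ++ (if s.getD n 0 = 1 then [n] else []) := by
      rw [List.range_succ, List.filter_append]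
      congr 1
      simp only [List.filter_cons, List.filter_nil, decide_eq_true_eq]
    have hbp1 : bsum r s 0 (n + 1) = bsum r s 0 n + bsum r s n 1 := by
      simpa using bsum_append r s 0 n 1
    rw [hstep, ih, hfil]
    by_cases h1 : s.getD n 0 = 1
    · have hne : ¬ s.getD n 0 = -1 := by rw [h1]; decide
      rw [if_pos h1, List.getLast?_concat]
      cases hL : ((List.range n).filter (fun i => s.getD i 0 = 1)).getLast? with
      | none =>
        -- no sell before n: tp was 0, bp = bsum 0 n
        have hnos : ssum r s n = 0 := by
          unfold ssum
          rw [List.getLast?_eq_none_iff] at hL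
          rw [hL]; simp
        show calcStepA r s (bsum r s 0 n, 0) n
            = (bsum r s (n + 1) (n + 1 - (n + 1)), ssum r s (n + 1) - bsum r s 0 n)
        unfold calcStepA
        rw [if_neg hne, if_pos h1, ssum_succ, if_pos h1, hnos, Nat.sub_self]
        simp only [Prod.mk.injEq]
        refine ⟨?_, ?_⟩
        · unfold bsum; simp
        · ring
      | some k =>
        have hkmem : k ∈ (List.range n).filter (fun i => s.getD i 0 = 1) :=
          List.mem_of_getLast? hL
        have hk1 : s.getD k 0 = 1 := by
          have := (List.mem_filter.mp hkmem).2; simpa using this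
        have hkn : k < n := by
          have := (List.mem_filter.mp hkmem).1; simpa using this
        have hsplit : bsum r s 0 n = bsum r s 0 k + bsum r s (k + 1) (n - (k + 1)) := by
          have hk01 : bsum r s 0 (k + 1) = bsum r s 0 k + bsum r s k 1 := by
            simpa using bsum_append r s 0 k 1
          have hbk : bsum r s k 1 = 0 := by
            rw [bsum_one]
            have : ¬ s.getD k 0 = -1 := by rw [hk1]; decide
            rw [if_neg this]
          calc bsum r s 0 n = bsum r s 0 (k + 1 + (n - (k + 1))) := by congr 1; omega
            _ = bsum r s 0 (k + 1) + bsum r s (0 + (k + 1)) (n - (k + 1)) :=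
                bsum_append r s 0 (k + 1) (n - (k + 1))
            _ = bsum r s 0 k + bsum r s (k + 1) (n - (k + 1)) := by
                rw [hk01, hbk]; ring_nf
        show calcStepA r s (bsum r s (k + 1) (n - (k + 1)), ssum r s n - bsum r s 0 k) n
            = (bsum r s (n + 1) (n + 1 - (n + 1)), ssum r s (n + 1) - bsum r s 0 n)
        unfold calcStepA
        rw [if_neg hne, if_pos h1, ssum_succ, if_pos h1, Nat.sub_self, hsplit]
        simp only [Prod.mk.injEq]
        refine ⟨?_, ?_⟩
        · unfold bsum; simp
        · ring
    · have hend : (if s.getD n 0 = 1 then [n] else []) = ([] : List Nat) := if_neg h1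
      rw [hend, List.append_nil]
      by_cases hm : s.getD n 0 = -1
      · cases hL : ((List.range n).filter (fun i => s.getD i 0 = 1)).getLast? with
        | none =>
          show calcStepA r s (bsum r s 0 n, 0) n = (bsum r s 0 (n + 1), 0)
          unfold calcStepA
          rw [if_pos hm, hbp1, bsum_one, if_pos hm]
        | some k =>
          have hkmem : k ∈ (List.range n).filter (fun i => s.getD i 0 = 1) :=
            List.mem_of_getLast? hL
          have hkn : k < n := by
            have := (List.mem_filter.mp hkmem).1; simpa using this
          show calcStepA r s (bsum r s (k + 1) (n - (k + 1)), ssum r s n - bsum r s 0 k) n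
              = (bsum r s (k + 1) (n + 1 - (k + 1)), ssum r s (n + 1) - bsum r s 0 k)
          unfold calcStepA
          rw [if_pos hm, ssum_succ, if_neg h1]
          simp only [Prod.mk.injEq]
          refine ⟨?_, ?_⟩
          · have h1n : n + 1 - (k + 1) = (n - (k + 1)) + 1 := by omega
            rw [h1n, bsum_append r s (k + 1) (n - (k + 1)) 1, bsum_one]
            have hkn' : k + 1 + (n - (k + 1)) = n := by omega
            rw [hkn', if_pos hm]
          · ring
      · cases hL : ((List.range n).filter (fun i => s.getD i 0 = 1)).getLast? with
        | none =>
          show calcStepA r s (bsum r s 0 n, 0) n = (bsum r s 0 (n + 1), 0)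
          unfold calcStepA
          rw [if_neg hm, if_neg h1, hbp1, bsum_one, if_neg hm]
          simp
        | some k =>
          have hkmem : k ∈ (List.range n).filter (fun i => s.getD i 0 = 1) :=
            List.mem_of_getLast? hL
          have hkn : k < n := by
            have := (List.mem_filter.mp hkmem).1; simpa using this
          show calcStepA r s (bsum r s (k + 1) (n - (k + 1)), ssum r s n - bsum r s 0 k) n
              = (bsum r s (k + 1) (n + 1 - (k + 1)), ssum r s (n + 1) - bsum r s 0 k)
          unfold calcStepA
          rw [if_neg hm, if_neg h1, ssum_succ, if_neg h1]
          simp only [Prod.mk.injEq]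
          refine ⟨?_, ?_⟩
          · have h1n : n + 1 - (k + 1) = (n - (k + 1)) + 1 := by omega
            rw [h1n, bsum_append r s (k + 1) (n - (k + 1)) 1, bsum_one]
            have hkn' : k + 1 + (n - (k + 1)) = n := by omega
            rw [hkn', if_neg hm]
            ring
          · ring

-- ===== VERDICT (by name: the statement is the Claim_ definition above) =====
theorem calc_py_spec : Claim_equal_calc_py := by
  intro r s _ _
  unfold Spec_calc_py calc_py calc_py_alt
  rw [calc_inv r s s.length]
  show _ = (match ((List.range s.length).filter (fun i => s.getD i 0 = 1)).getLast? with
    | none => (0 : Int)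
    | some last =>
        (((List.range s.length).filter (fun i => s.getD i 0 = 1)).map (fun i => r.getD i 0)).sum
          - (((List.range last).filter (fun i => s.getD i 0 = -1)).map (fun i => r.getD i 0)).sum)
  cases hL : ((List.range s.length).filter (fun i => s.getD i 0 = 1)).getLast? with
  | none => rfl
  | some k =>
    show ssum r s s.length - bsum r s 0 k = _
    unfold ssum bsum
    simp only [List.range_eq_range']
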